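-- pv_equiv track=rewrite | github.com/guardave/aig-rlic-plus | app/components/pair_registry.py | humanize_column_tokens
-- ===== SOURCE A (Python) =====
-- _FWD_RETURN_LABELS = {
--     "spy_fwd_21d": "SPY 21-day forward return",
--     "spy_fwd_63d": "SPY 63-day forward return",
--     "spy_fwd_126d": "SPY 126-day forward return",
--     "spy_fwd_252d": "SPY 252-day forward return",
--     "spy_fwd_12m": "SPY 12-month forward return",
--     "xlv_fwd_21d": "XLV 21-day forward return",
--     "xlv_fwd_63d": "XLV 63-day forward return",
--     "xlv_fwd_12m": "XLV 12-month forward return",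
--     "xlp_fwd_21d": "XLP 21-day forward return",
--     "xlp_fwd_63d": "XLP 63-day forward return",
--     "xlp_fwd_12m": "XLP 12-month forward return",
-- }
--
-- def humanize_column_tokens(text: str) -> str:
--     """Replace raw forward-return column tokens with friendly labels.
--
--     Landing-page display polish: pipeline-generated strings such as
--     ``"indpro_zscore_60m predicts spy_fwd_12m (coef=-0.02 …)"`` leak raw
--     column names into the user-facing card. This helper substitutes known
--     tokens from ``_FWD_RETURN_LABELS``. Unknown tokens pass through
--     unchanged (no masking of legitimate content).
--     """
--     if not text:
--         return text
--     out = text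
--     # Sort longest-first so ``spy_fwd_126d`` matches before ``spy_fwd_12``.
--     for token in sorted(_FWD_RETURN_LABELS, key=len, reverse=True):
--         if token in out:
--             out = out.replace(token, _FWD_RETURN_LABELS[token])
--     return out
-- ===== SOURCE B (Python) =====
-- _TOKEN_LABELS = [
--     # longest tokens first so e.g. "spy_fwd_126d" is matched before "spy_fwd_12m"
--     ("spy_fwd_126d", "SPY 126-day forward return"),
--     ("spy_fwd_252d", "SPY 252-day forward return"),
--     ("spy_fwd_21d", "SPY 21-day forward return"),
--     ("spy_fwd_63d", "SPY 63-day forward return"),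
--     ("spy_fwd_12m", "SPY 12-month forward return"),
--     ("xlv_fwd_21d", "XLV 21-day forward return"),
--     ("xlv_fwd_63d", "XLV 63-day forward return"),
--     ("xlv_fwd_12m", "XLV 12-month forward return"),
--     ("xlp_fwd_21d", "XLP 21-day forward return"),
--     ("xlp_fwd_63d", "XLP 63-day forward return"),
--     ("xlp_fwd_12m", "XLP 12-month forward return"),
-- ]
--
--
-- def _match_at(text, i):
--     """First table pair whose token occurs at position i, or None."""
--     for token, label in _TOKEN_LABELS:
--         if text.startswith(token, i):
--             return token, label
--     return None
--
--
-- def humanize_column_tokens(text: str) -> str: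
--     """Replace raw forward-return column tokens with friendly labels.
--
--     One left-to-right scan: at each position emit the label of the first
--     (longest-first table) token matching there, else copy the character.
--     """
--     if not text:
--         return text
--     parts = []
--     i = 0
--     n = len(text)
--     while i < n:
--         m = _match_at(text, i)
--         if m is None:
--             parts.append(text[i])
--             i += 1
--         else:
--             parts.append(m[1])
--             i += len(m[0])
--     return "".join(parts)
-- ===== Notes on version B (the rewrite author's own statement) =====
-- stated objective: alternative
-- what changed: B replaces A's eleven sequential full-text str.replace passes over a sorted dict with a single left-to-right scan over a longest-first (token,label) table that at each position emits the first matching token's label or copies the character.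
import Mathlib
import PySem

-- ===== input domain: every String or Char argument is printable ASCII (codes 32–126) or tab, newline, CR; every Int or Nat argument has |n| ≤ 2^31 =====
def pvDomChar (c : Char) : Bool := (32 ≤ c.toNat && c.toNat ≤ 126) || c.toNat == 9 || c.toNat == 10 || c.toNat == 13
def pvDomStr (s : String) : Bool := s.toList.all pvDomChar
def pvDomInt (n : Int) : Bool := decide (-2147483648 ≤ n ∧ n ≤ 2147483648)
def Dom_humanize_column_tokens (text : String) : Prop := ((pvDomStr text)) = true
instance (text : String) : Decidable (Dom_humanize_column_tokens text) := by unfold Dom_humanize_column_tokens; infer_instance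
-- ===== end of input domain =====

-- B replaces A's eleven sequential full-text str.replace passes with one left-to-right scan over a
-- longest-first (token, label) table; objective: alternative (a different algorithm, similar cost).

-- ===== PORT A =====
-- the module constant _FWD_RETURN_LABELS
def pvFwdReturnLabels : PySem.Dict String String :=
  PySem.Dict.ofList [
    ("spy_fwd_21d", "SPY 21-day forward return"),
    ("spy_fwd_63d", "SPY 63-day forward return"),
    ("spy_fwd_126d", "SPY 126-day forward return"),
    ("spy_fwd_252d", "SPY 252-day forward return"),
    ("spy_fwd_12m", "SPY 12-month forward return"),
    ("xlv_fwd_21d", "XLV 21-day forward return"),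
    ("xlv_fwd_63d", "XLV 63-day forward return"),
    ("xlv_fwd_12m", "XLV 12-month forward return"),
    ("xlp_fwd_21d", "XLP 21-day forward return"),
    ("xlp_fwd_63d", "XLP 63-day forward return"),
    ("xlp_fwd_12m", "XLP 12-month forward return")]

-- sorted(_FWD_RETURN_LABELS, key=len, reverse=True) in A's loop header
def pvSortedTokens : List String :=
  PySem.List.sorted (PySem.Dict.keys pvFwdReturnLabels) (fun t => PySem.Str.len t) true

-- A: for token in sorted(...): if token in out: out = out.replace(token, _FWD_RETURN_LABELS[token])
-- (_FWD_RETURN_LABELS[token] ported as getD with default "": token is always a key, KeyError unreachable)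
def humanize_column_tokens (text : String) : String :=
  if text = "" then text
  else pvSortedTokens.foldl
    (fun out token =>
      if PySem.Str.isIn token out then
        PySem.Str.replace out token (PySem.Dict.getD pvFwdReturnLabels token "")
      else out) text

-- ===== PORT B =====
-- B's module constant _TOKEN_LABELS: the replacement table, longest tokens first
def pvTokenLabels : List (String × String) := [
  ("spy_fwd_126d", "SPY 126-day forward return"),
  ("spy_fwd_252d", "SPY 252-day forward return"),
  ("spy_fwd_21d", "SPY 21-day forward return"),
  ("spy_fwd_63d", "SPY 63-day forward return"),
  ("spy_fwd_12m", "SPY 12-month forward return"),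
  ("xlv_fwd_21d", "XLV 21-day forward return"),
  ("xlv_fwd_63d", "XLV 63-day forward return"),
  ("xlv_fwd_12m", "XLV 12-month forward return"),
  ("xlp_fwd_21d", "XLP 21-day forward return"),
  ("xlp_fwd_63d", "XLP 63-day forward return"),
  ("xlp_fwd_12m", "XLP 12-month forward return")]

-- _match_at(text, i): first table pair whose token occurs at position i (the scan hands the tail
-- text[i:] to the helper, so text.startswith(token, i) becomes a prefix test on that tail)
def pvMatchAt : List (String × String) → List Char → Option (String × String)
  | [], _ => none
  | (tok, lab) :: ps, cs => if tok.toList.isPrefixOf cs then some (tok, lab) else pvMatchAt ps cs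

-- the while loop of B: emit the matched pair's label and skip the token, else copy one character;
-- "".join(parts) is the concatenation of the emitted pieces. The inner [] case is unreachable
-- (no table token is empty); it only makes the recursion total.
def pvScan (ps : List (String × String)) : List Char → List Char
  | [] => []
  | c :: t =>
    match pvMatchAt ps (c :: t) with
    | some (tok, lab) =>
      match tok.toList with
      | _ :: mrest => lab.toList ++ pvScan ps (t.drop mrest.length)
      | [] => c :: pvScan ps t
    | none => c :: pvScan ps t
  termination_by cs => cs.length
  decreasing_by
    · simp only [List.length_drop, List.length_cons]; omega
    · simp only [List.length_cons]; omega

def humanize_column_tokens_alt (text : String) : String :=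
  if text = "" then text
  else String.ofList (pvScan pvTokenLabels text.toList)

-- ===== PRECONDITION & SPEC =====
def Spec_humanize_column_tokens (text : String) (out : String) : Prop := out = humanize_column_tokens_alt text
instance (text : String) (out : String) : Decidable (Spec_humanize_column_tokens text out) := by unfold Spec_humanize_column_tokens; infer_instance

-- ===== CLAIM (what is proved, stated in full; the proofs are below) =====
def Claim_equal_humanize_column_tokens : Prop := ∀ (text : String), Dom_humanize_column_tokens text → Spec_humanize_column_tokens text (humanize_column_tokens text)

-- ===== LEMMAS AND PROOFS =====

-- the label A substitutes for a token
def pvLab (k : String) : List Char := (PySem.Dict.getD pvFwdReturnLabels k "").toList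

-- A's str.replace (old nonempty) as plain structural recursion on the list
def pvRepl (old new : List Char) : List Char → List Char
  | [] => []
  | c :: t =>
    if old.isPrefixOf (c :: t) then new ++ pvRepl old new (t.drop (old.length - 1))
    else c :: pvRepl old new t
  termination_by cs => cs.length
  decreasing_by
    · simp only [List.length_drop, List.length_cons]; omega
    · simp only [List.length_cons]; omega

lemma pvRepl_pos {old : List Char} (new : List Char) {x : List Char}
    (ht : old ≠ []) (h : old <+: x) :
    pvRepl old new x = new ++ pvRepl old new (x.drop old.length) := by
  match x, h with
  | [], h => cases ht (List.prefix_nil.mp h)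
  | c :: t, h =>
    rw [pvRepl]
    rw [if_pos (List.isPrefixOf_iff_prefix.mpr h)]
    have hd : (c :: t).drop old.length = t.drop (old.length - 1) := by
      conv_lhs => rw [show old.length = old.length - 1 + 1 from by
        have := List.length_pos_iff.mpr ht; omega]
      rw [List.drop_succ_cons]
    rw [hd]

lemma pvRepl_neg {old : List Char} (new : List Char) {c : Char} {t : List Char}
    (h : ¬ old <+: (c :: t)) :
    pvRepl old new (c :: t) = c :: pvRepl old new t := by
  rw [pvRepl, if_neg (fun hb => h (List.isPrefixOf_iff_prefix.mp hb))]

lemma pvReplGo_eq (old new : List Char) (ht : old ≠ []) :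
    ∀ fuel l acc, l.length ≤ fuel →
      PySem.Chars.replace.go old new fuel l acc = acc.reverse ++ pvRepl old new l := by
  intro fuel
  induction fuel with
  | zero =>
    intro l acc hl
    have : l = [] := List.length_eq_zero_iff.mp (Nat.le_zero.mp hl)
    subst this
    simp [PySem.Chars.replace.go, pvRepl]
  | succ n ih =>
    intro l acc hl
    match l with
    | [] => simp [PySem.Chars.replace.go, pvRepl]
    | c :: t =>
      rw [PySem.Chars.replace.go]
      by_cases hp : old.isPrefixOf (c :: t)
      · rw [if_pos hp]
        have hpre : old <+: (c :: t) := List.isPrefixOf_iff_prefix.mp hp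
        have hlen : 0 < old.length := List.length_pos_iff.mpr ht
        rw [ih _ _ (by simp [List.length_drop] at *; omega)]
        rw [pvRepl_pos new ht hpre]
        have : (c :: t).drop old.length = t.drop (old.length - 1) := by
          conv_lhs => rw [show old.length = old.length - 1 + 1 by omega]
          rw [List.drop_succ_cons]
        rw [this]
        simp
      · rw [if_neg hp]
        rw [ih _ _ (by simp at hl ⊢; omega)]
        rw [pvRepl_neg new (fun hpre => hp (List.isPrefixOf_iff_prefix.mpr hpre))]
        simp

lemma replace_eq_pvRepl (l old new : List Char) (ht : old ≠ []) :
    PySem.Chars.replace l old new = pvRepl old new l := by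
  rw [PySem.Chars.replace]
  rw [if_neg (by simp [List.isEmpty_iff, ht])]
  simpa using pvReplGo_eq old new ht l.length l [] le_rfl

-- a prefix of a concatenation is a prefix of the left part, or extends it
lemma pvPrefixAppendCases {u a x : List Char} (h : u <+: a ++ x) : u <+: a ∨ a <+: u := by
  obtain ⟨z, hz⟩ := h
  rcases List.append_eq_append_iff.mp hz with ⟨a', ha, _⟩ | ⟨c', hu, _⟩
  · exact Or.inl ⟨a', ha.symm⟩
  · exact Or.inr ⟨c', hu.symm⟩

lemma pvRepl_id_of_not_infix {old : List Char} (new : List Char) :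
    ∀ x, ¬ old <:+: x → pvRepl old new x = x := by
  intro x
  induction x with
  | nil => intro _; rw [pvRepl]
  | cons c t ih =>
    intro h
    have hnp : ¬ old <+: (c :: t) := fun hp => h hp.isInfix
    rw [pvRepl_neg new hnp, ih (fun hi => h (hi.trans (List.suffix_cons c t).isInfix))]

-- no token suffix gains a match through a replacement pass (labels are opaque to token suffixes)
lemma pvRepl_no_new (ks : List String) (t l : List Char) (ht : t ≠ [])
    (hL1 : ∀ w ∈ ks, ∀ i < w.toList.length,
      ¬ w.toList.drop i <+: l ∧ ¬ l <+: w.toList.drop i) :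
    ∀ x s, (∃ w ∈ ks, ∃ i, s = w.toList.drop i) → s <+: pvRepl t l x → s <+: x := by
  suffices H : ∀ n x, x.length ≤ n → ∀ s, (∃ w ∈ ks, ∃ i, s = w.toList.drop i) →
      s <+: pvRepl t l x → s <+: x by
    intro x s hs hp; exact H x.length x le_rfl s hs hp
  intro n
  induction n with
  | zero =>
    intro x hx s hs hp
    have : x = [] := List.length_eq_zero_iff.mp (Nat.le_zero.mp hx)
    subst this
    simpa [pvRepl] using hp
  | succ n ih =>
    intro x hx s hs hp
    match x with
    | [] => simpa [pvRepl] using hp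
    | c :: x2 =>
      rcases hs with ⟨w, hw, i, hsi⟩
      by_cases hpt : t <+: (c :: x2)
      · rw [pvRepl_pos l ht hpt] at hp
        rcases s with _ | ⟨s₁, s'⟩
        · exact List.nil_prefix
        · exfalso
          have hne : w.toList.drop i ≠ [] := by rw [← hsi]; simp
          have hi : i < w.toList.length := by
            by_contra hge
            exact hne (List.drop_eq_nil_of_le (by omega))
          rcases pvPrefixAppendCases hp with h1 | h1
          · exact (hL1 w hw i hi).1 (hsi ▸ h1)
          · exact (hL1 w hw i hi).2 (hsi ▸ h1)
      · rw [pvRepl_neg l hpt] at hp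
        rcases s with _ | ⟨s₁, s'⟩
        · exact List.nil_prefix
        · rw [List.cons_prefix_cons] at hp
          obtain ⟨rfl, hp'⟩ := hp
          have hs' : s' = w.toList.drop (i + 1) := by
            have := congrArg List.tail hsi
            simpa [List.tail_drop] using this
          have : s' <+: x2 :=
            ih x2 (by simp at hx; omega) s' ⟨w, hw, i + 1, hs'⟩ hp'
          exact List.cons_prefix_cons.mpr ⟨rfl, this⟩

-- a replacement pass that fires nowhere inside a prefix keeps that prefix
lemma pvRepl_pres (t l : List Char) :
    ∀ p x, p <+: x → (∀ j < p.length, ¬ t <+: x.drop j) → p <+: pvRepl t l x := by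
  intro p
  induction p with
  | nil => intro x _ _; exact List.nil_prefix
  | cons c p' ih =>
    intro x hp hj
    match x, hp with
    | c :: x2, hp =>
      have hc := (List.cons_prefix_cons.mp hp).1
      subst hc
      have hp' := (List.cons_prefix_cons.mp hp).2
      have h0 : ¬ t <+: (c :: x2) := by simpa using hj 0 (by simp)
      rw [pvRepl_neg l h0]
      refine List.cons_prefix_cons.mpr ⟨rfl, ih x2 hp' ?_⟩
      intro j hjlen
      have := hj (j + 1) (by simp; omega)
      simpa using this

lemma pvRepl_skip (t l : List Char) :
    ∀ u r, (∀ j < u.length, ¬ t <+: (u ++ r).drop j) →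
      pvRepl t l (u ++ r) = u ++ pvRepl t l r := by
  intro u
  induction u with
  | nil => intro r _; rfl
  | cons c u' ih =>
    intro r hj
    have h0 : ¬ t <+: (c :: (u' ++ r)) := by simpa using hj 0 (by simp)
    have h' : ∀ j < u'.length, ¬ t <+: (u' ++ r).drop j := by
      intro j hjlen
      have := hj (j + 1) (by simp; omega)
      simpa using this
    rw [List.cons_append, pvRepl_neg l h0, ih r h', List.cons_append]

-- pvMatchAt basics
lemma pvMatchAt_none_iff (ps : List (String × String)) (cs : List Char) :
    pvMatchAt ps cs = none ↔ ∀ p ∈ ps, ¬ p.1.toList <+: cs := by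
  induction ps with
  | nil => simp [pvMatchAt]
  | cons q rest ih =>
    obtain ⟨tok, lab⟩ := q
    by_cases h : tok.toList.isPrefixOf cs
    · simp only [pvMatchAt, if_pos h]
      constructor
      · intro hc; cases hc
      · intro hall
        exact (hall (tok, lab) List.mem_cons_self (List.isPrefixOf_iff_prefix.mp h)).elim
    · simp only [pvMatchAt, if_neg h, ih]
      constructor
      · intro hall p hp
        rcases List.mem_cons.mp hp with rfl | hp'
        · exact fun hpre => h (List.isPrefixOf_iff_prefix.mpr hpre)
        · exact hall p hp'
      · intro hall p hp; exact hall p (List.mem_cons_of_mem _ hp)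

lemma pvMatchAt_congr (ps : List (String × String)) (x y : List Char)
    (h : ∀ p ∈ ps, (p.1.toList <+: x ↔ p.1.toList <+: y)) :
    pvMatchAt ps x = pvMatchAt ps y := by
  induction ps with
  | nil => rfl
  | cons q rest ih =>
    obtain ⟨tok, lab⟩ := q
    have hk := h (tok, lab) (List.mem_cons_self)
    by_cases hx : tok.toList.isPrefixOf x
    · have hy : tok.toList.isPrefixOf y :=
        List.isPrefixOf_iff_prefix.mpr (hk.mp (List.isPrefixOf_iff_prefix.mp hx))
      simp [pvMatchAt, hx, hy]
    · have hy : ¬ tok.toList.isPrefixOf y := fun hb =>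
        hx (List.isPrefixOf_iff_prefix.mpr (hk.mpr (List.isPrefixOf_iff_prefix.mp hb)))
      simp only [pvMatchAt, if_neg hx, if_neg hy]
      exact ih (fun p hp => h p (List.mem_cons_of_mem _ hp))

lemma pvMatchAt_some {ps : List (String × String)} {cs : List Char} {tok lab : String}
    (h : pvMatchAt ps cs = some (tok, lab)) : tok.toList <+: cs ∧ (tok, lab) ∈ ps := by
  induction ps with
  | nil => simp [pvMatchAt] at h
  | cons q rest ih =>
    obtain ⟨k, l⟩ := q
    by_cases hk : k.toList.isPrefixOf cs
    · simp only [pvMatchAt, if_pos hk, Option.some.injEq, Prod.mk.injEq] at h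
      obtain ⟨rfl, rfl⟩ := h
      exact ⟨List.isPrefixOf_iff_prefix.mp hk, List.mem_cons_self⟩
    · simp only [pvMatchAt, if_neg hk] at h
      obtain ⟨hpre, hmem⟩ := ih h
      exact ⟨hpre, List.mem_cons_of_mem _ hmem⟩

-- pvScan unfoldings
lemma pvScan_nil (ps : List (String × String)) : pvScan ps [] = [] := by simp [pvScan]

lemma pvScan_some {ps : List (String × String)} {cs : List Char} {tok lab : String}
    (hcs : cs ≠ []) (h : pvMatchAt ps cs = some (tok, lab)) (hm : tok.toList ≠ []) :
    pvScan ps cs = lab.toList ++ pvScan ps (cs.drop tok.toList.length) := by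
  obtain ⟨c, t, rfl⟩ := List.exists_cons_of_ne_nil hcs
  obtain ⟨m₁, mrest, hm'⟩ := List.exists_cons_of_ne_nil hm
  simp only [pvScan, h, hm']
  simp [List.drop_succ_cons]

lemma pvScan_none {ps : List (String × String)} {c : Char} {t : List Char}
    (h : pvMatchAt ps (c :: t) = none) :
    pvScan ps (c :: t) = c :: pvScan ps t := by
  simp only [pvScan, h]

lemma pvScan_empty_ps : ∀ cs, pvScan [] cs = cs := by
  intro cs
  induction cs with
  | nil => simp [pvScan]
  | cons c t ih => simp [pvScan, pvMatchAt, ih]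

-- the scan copies a segment no table token can match into
lemma pvScan_append_opaque (ps : List (String × String)) :
    ∀ l x, (∀ j < l.length, ∀ z, pvMatchAt ps (l.drop j ++ z) = none) →
      pvScan ps (l ++ x) = l ++ pvScan ps x := by
  intro l
  induction l with
  | nil => intro x _; rfl
  | cons c l' ih =>
    intro x h
    have h0 : pvMatchAt ps (c :: (l' ++ x)) = none := by
      have := h 0 (by simp) x
      simpa using this
    have h' : ∀ j < l'.length, ∀ z, pvMatchAt ps (l'.drop j ++ z) = none := by
      intro j hj z
      have := h (j + 1) (by simp; omega) z
      simpa using this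
    rw [List.cons_append, pvScan_none h0, ih x h', List.cons_append]

-- head-characters-differ test: enough to rule out prefix relations either way
def pvHeadNe (a b : List Char) : Bool :=
  match a, b with
  | x :: _, y :: _ => decide (x ≠ y)
  | _, _ => false

lemma pvHeadNe_spec {a b : List Char} (h : pvHeadNe a b = true) :
    ¬ a <+: b ∧ ¬ b <+: a := by
  match a, b with
  | x :: a', y :: b' =>
    simp only [pvHeadNe, decide_eq_true_eq] at h
    constructor
    · intro hp; exact h (List.cons_prefix_cons.mp hp).1
    · intro hp; exact h ((List.cons_prefix_cons.mp hp).1).symm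

-- the decidable side conditions one elimination step needs (checked by `decide` on the literal data)
def pvStepOK (k : String) (ks : List String) : Bool :=
  decide (k.toList ≠ []) &&
  ks.all (fun w =>
    decide (w.toList ≠ []) &&
    (List.range (pvLab k).length).all (fun j => pvHeadNe w.toList ((pvLab k).drop j)) &&
    (List.range w.toList.length).all (fun i => pvHeadNe (w.toList.drop i) (pvLab k)) &&
    (List.range w.toList.length).all (fun j => j == 0 || pvHeadNe k.toList (w.toList.drop j)))

def pvAllOK : List (String × String) → Bool
  | [] => true
  | (tok, lab) :: ps =>
    (lab.toList == pvLab tok) && pvStepOK tok (ps.map Prod.fst) && pvAllOK ps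

lemma pvStepOK_props {k : String} {ks : List String} (h : pvStepOK k ks = true) :
    k.toList ≠ [] ∧
    (∀ w ∈ ks, w.toList ≠ []) ∧
    (∀ w ∈ ks, ∀ j < (pvLab k).length,
      ¬ w.toList <+: (pvLab k).drop j ∧ ¬ (pvLab k).drop j <+: w.toList) ∧
    (∀ w ∈ ks, ∀ i < w.toList.length,
      ¬ w.toList.drop i <+: pvLab k ∧ ¬ pvLab k <+: w.toList.drop i) ∧
    (∀ w ∈ ks, ∀ j, 0 < j → j < w.toList.length →
      ¬ k.toList <+: w.toList.drop j ∧ ¬ w.toList.drop j <+: k.toList) := by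
  simp only [pvStepOK, Bool.and_eq_true, List.all_eq_true, decide_eq_true_eq,
    List.mem_range, Bool.or_eq_true, beq_iff_eq] at h
  obtain ⟨ht, hall⟩ := h
  refine ⟨ht, ?_, ?_, ?_, ?_⟩
  · intro w hw; exact (hall w hw).1.1.1
  · intro w hw j hj; exact pvHeadNe_spec ((hall w hw).1.1.2 j hj)
  · intro w hw i hi; exact pvHeadNe_spec ((hall w hw).1.2 i hi)
  · intro w hw j hj0 hjl
    rcases (hall w hw).2 j hjl with h' | h'
    · omega
    · exact pvHeadNe_spec h'

-- one elimination step: scanning with ((tok, lab) :: ps) is scanning with ps after A's replace pass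
lemma pvStep (tok lab : String) (ps : List (String × String))
    (hlab : lab.toList = pvLab tok)
    (hOK : pvStepOK tok (ps.map Prod.fst) = true) :
    ∀ cs, pvScan ((tok, lab) :: ps) cs = pvScan ps (pvRepl tok.toList (pvLab tok) cs) := by
  obtain ⟨ht, hts', hopq', hL1', hov'⟩ := pvStepOK_props hOK
  set t := tok.toList with htdef
  set l := pvLab tok with hldef
  have mem1 : ∀ p ∈ ps, p.1 ∈ ps.map Prod.fst := fun p hp => List.mem_map_of_mem hp
  have hts : ∀ p ∈ ps, p.1.toList ≠ [] := fun p hp => hts' p.1 (mem1 p hp)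
  have hopq : ∀ p ∈ ps, ∀ j < l.length,
      ¬ p.1.toList <+: l.drop j ∧ ¬ l.drop j <+: p.1.toList :=
    fun p hp => hopq' p.1 (mem1 p hp)
  have hL1 : ∀ w ∈ ps.map Prod.fst, ∀ i < w.toList.length,
      ¬ w.toList.drop i <+: l ∧ ¬ l <+: w.toList.drop i := hL1'
  have hov : ∀ p ∈ ps, ∀ j, 0 < j → j < p.1.toList.length →
      ¬ t <+: p.1.toList.drop j ∧ ¬ p.1.toList.drop j <+: t :=
    fun p hp => hov' p.1 (mem1 p hp)
  -- segments of the label are opaque to every table pair in ps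
  have hop : ∀ j < l.length, ∀ z, pvMatchAt ps (l.drop j ++ z) = none := by
    intro j hj z
    rw [pvMatchAt_none_iff]
    intro p hp hpre
    rcases pvPrefixAppendCases hpre with h1 | h1
    · exact (hopq p hp j hj).1 h1
    · exact (hopq p hp j hj).2 h1
  suffices H : ∀ n cs, cs.length ≤ n → pvScan ((tok, lab) :: ps) cs = pvScan ps (pvRepl t l cs) by
    intro cs; exact H cs.length cs le_rfl
  intro n
  induction n with
  | zero =>
    intro cs hcs
    have : cs = [] := List.length_eq_zero_iff.mp (Nat.le_zero.mp hcs)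
    subst this
    rw [pvScan_nil, pvRepl, pvScan_nil]
  | succ n ih =>
    intro cs hcs
    match cs with
    | [] => rw [pvScan_nil, pvRepl, pvScan_nil]
    | c :: r =>
      by_cases hpt : t <+: (c :: r)
      · -- tok itself matches here: both sides emit the label and continue after it
        obtain ⟨r1, hr1⟩ := hpt
        have hmatch : pvMatchAt ((tok, lab) :: ps) (c :: r) = some (tok, lab) := by
          have hpre : t <+: (c :: r) := ⟨r1, hr1⟩
          simp only [pvMatchAt]
          rw [if_pos (List.isPrefixOf_iff_prefix.mpr hpre)]
        rw [pvScan_some (by simp) hmatch ht]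
        have hdrop : (c :: r).drop t.length = r1 := by
          rw [← hr1, List.drop_left]
        rw [hdrop]
        have hr1len : r1.length ≤ n := by
          have hlen := congrArg List.length hr1
          rw [List.length_append, List.length_cons] at hlen
          rw [List.length_cons] at hcs
          have h1 : 0 < t.length := List.length_pos_iff.mpr ht
          omega
        rw [ih r1 hr1len]
        rw [pvRepl_pos l ht ⟨r1, hr1⟩, hdrop]
        rw [pvScan_append_opaque ps l (pvRepl t l r1) (fun j hj z => hop j hj z)]
        rw [hlab]
      · have hrepl : pvRepl t l (c :: r) = c :: pvRepl t l r := pvRepl_neg l hpt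
        rcases hm : pvMatchAt ps (c :: r) with _ | ⟨w, wl⟩
        · -- nothing matches here: both sides copy c
          have hmnone : pvMatchAt ((tok, lab) :: ps) (c :: r) = none := by
            have hnb : ¬ tok.toList.isPrefixOf (c :: r) :=
              fun hb => hpt (List.isPrefixOf_iff_prefix.mp hb)
            simp only [pvMatchAt, if_neg hnb]
            exact hm
          rw [pvScan_none hmnone]
          have hnone2 : pvMatchAt ps (c :: pvRepl t l r) = none := by
            rw [pvMatchAt_none_iff]
            intro p hp hpre
            have hwne := hts p hp
            obtain ⟨w₁, w', hwt⟩ := List.exists_cons_of_ne_nil hwne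
            rw [hwt, List.cons_prefix_cons] at hpre
            obtain ⟨hw₁, hp'⟩ := hpre
            have hw' : w' <+: r :=
              pvRepl_no_new (ps.map Prod.fst) t l ht hL1 r w'
                ⟨p.1, mem1 p hp, 1, by simp [hwt]⟩ hp'
            exact (pvMatchAt_none_iff ps (c :: r)).mp hm p hp
              (by rw [hwt, hw₁]; exact List.cons_prefix_cons.mpr ⟨rfl, hw'⟩)
          rw [hrepl, pvScan_none hnone2]
          have : r.length ≤ n := by simp at hcs; omega
          rw [ih r this]
        · -- some table pair (w, wl) ∈ ps matches here in both strings
          obtain ⟨hmpre, hmem⟩ := pvMatchAt_some hm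
          set m := w.toList with hmw
          obtain ⟨r2, hr2⟩ := hmpre
          have hmne : m ≠ [] := hts (w, wl) hmem
          have hmlen : 0 < m.length := List.length_pos_iff.mpr hmne
          -- t matches at no position inside the matched token occurrence
          have hnt : ∀ j < m.length, ¬ t <+: (m ++ r2).drop j := by
            intro j hj hp
            rcases Nat.eq_zero_or_pos j with rfl | hj0
            · rw [List.drop_zero, hr2] at hp
              exact hpt hp
            · rw [List.drop_append_of_le_length (by omega)] at hp
              rcases pvPrefixAppendCases hp with h1 | h1
              · exact (hov (w, wl) hmem j hj0 (by omega)).1 h1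
              · exact (hov (w, wl) hmem j hj0 (by omega)).2 h1
          have hskip : pvRepl t l (c :: r) = m ++ pvRepl t l r2 := by
            rw [← hr2]; exact pvRepl_skip t l m r2 (by rw [hr2] at hnt ⊢; exact hnt)
          -- the table sees the same matches before and after the pass for tok
          have hcong : pvMatchAt ps (m ++ pvRepl t l r2) = some (w, wl) := by
            rw [pvMatchAt_congr ps (m ++ pvRepl t l r2) (m ++ r2) ?_, hr2, hm]
            intro p hp
            constructor
            · intro hpre
              rcases pvPrefixAppendCases hpre with h1 | h1
              · exact h1.trans (List.prefix_append m r2)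
              · obtain ⟨v', hv'⟩ := h1
                rw [← hv'] at hpre
                have hv'pre : v' <+: pvRepl t l r2 :=
                  (List.prefix_append_right_inj m).mp hpre
                have hv'suf : v' = p.1.toList.drop m.length := by
                  rw [← hv', List.drop_left]
                have : v' <+: r2 :=
                  pvRepl_no_new (ps.map Prod.fst) t l ht hL1 r2 v'
                    ⟨p.1, mem1 p hp, m.length, hv'suf⟩ hv'pre
                rw [← hv']
                exact (List.prefix_append_right_inj m).mpr this
            · intro hpre
              rcases pvPrefixAppendCases hpre with h1 | h1
              · exact h1.trans (List.prefix_append m _)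
              · obtain ⟨v', hv'⟩ := h1
                have hv'pre : v' <+: r2 := by
                  rw [← hv'] at hpre
                  exact (List.prefix_append_right_inj m).mp hpre
                have hv'eq : v' = p.1.toList.drop m.length := by
                  rw [← hv', List.drop_left]
                have hkeep : v' <+: pvRepl t l r2 := by
                  refine pvRepl_pres t l v' r2 hv'pre ?_
                  intro j hj hp2
                  obtain ⟨z, hz⟩ := hv'pre
                  rw [← hz, List.drop_append_of_le_length (by omega)] at hp2
                  have hjm : 0 < m.length + j := by omega
                  have hjlt : m.length + j < p.1.toList.length := by
                    have hlen := congrArg List.length hv'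
                    rw [List.length_append] at hlen
                    omega
                  have hdd : v'.drop j = p.1.toList.drop (m.length + j) := by
                    rw [hv'eq, List.drop_drop]
                    try simp [Nat.add_comm]
                  rcases pvPrefixAppendCases hp2 with h2 | h2
                  · exact (hov p hp (m.length + j) hjm hjlt).1 (hdd ▸ h2)
                  · exact (hov p hp (m.length + j) hjm hjlt).2 (hdd ▸ h2)
                rw [← hv']
                exact (List.prefix_append_right_inj m).mpr hkeep
          -- now unfold both scans
          have hmatchL : pvMatchAt ((tok, lab) :: ps) (c :: r) = some (w, wl) := by
            have hnb : ¬ tok.toList.isPrefixOf (c :: r) :=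
              fun hb => hpt (List.isPrefixOf_iff_prefix.mp hb)
            simp only [pvMatchAt, if_neg hnb]
            exact hm
          rw [pvScan_some (by simp) hmatchL hmne]
          rw [hskip]
          rw [pvScan_some (List.append_ne_nil_of_left_ne_nil hmne _) hcong hmne]
          rw [← hmw, List.drop_left]
          have hdropcs : (c :: r).drop m.length = r2 := by
            rw [← hr2, List.drop_left]
          rw [hdropcs]
          congr 1
          refine ih r2 ?_
          have hlen := congrArg List.length hr2
          rw [List.length_append, List.length_cons] at hlen
          rw [List.length_cons] at hcs
          omega

-- chaining the steps: B's single scan is A's sequence of replace passes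
lemma pvChain : ∀ (ps : List (String × String)), pvAllOK ps = true →
    ∀ cs, pvScan ps cs
      = (ps.map Prod.fst).foldl (fun (cs : List Char) (w : String) => pvRepl w.toList (pvLab w) cs) cs := by
  intro ps
  induction ps with
  | nil => intro _ cs; simp [pvScan_empty_ps]
  | cons q ps ih =>
    obtain ⟨tok, lab⟩ := q
    intro h cs
    simp only [pvAllOK, Bool.and_eq_true, beq_iff_eq] at h
    rw [pvStep tok lab ps h.1.1 h.1.2 cs, ih h.2 (pvRepl tok.toList (pvLab tok) cs)]
    rfl

-- A's fold over strings, viewed on the character lists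
lemma pvFold_toList : ∀ (ks : List String) (s : String), (∀ w ∈ ks, w.toList ≠ []) →
    (ks.foldl (fun (out token : String) =>
      if PySem.Str.isIn token out then
        PySem.Str.replace out token (PySem.Dict.getD pvFwdReturnLabels token "")
      else out) s).toList
    = ks.foldl (fun (cs : List Char) (w : String) => pvRepl w.toList (pvLab w) cs) s.toList := by
  intro ks
  induction ks with
  | nil => intro s _; rfl
  | cons k ks ih =>
    intro s hne
    simp only [List.foldl_cons]
    have hstep : (if PySem.Str.isIn k s then
        PySem.Str.replace s k (PySem.Dict.getD pvFwdReturnLabels k "")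
      else s).toList = pvRepl k.toList (pvLab k) s.toList := by
      by_cases h : PySem.Str.isIn k s = true
      · rw [if_pos h]
        rw [PySem.Str.toList_replace]
        exact replace_eq_pvRepl _ _ _ (hne k List.mem_cons_self)
      · rw [if_neg h]
        have hfalse : PySem.Str.isIn k s = false := by
          cases hb : PySem.Str.isIn k s with
          | false => rfl
          | true => exact absurd hb h
        have hni : ¬ k.toList <:+: s.toList := by
          rw [PySem.Str.isIn_eq, PySem.Chars.isIn_eq_false_iff] at hfalse
          exact hfalse
        exact (pvRepl_id_of_not_infix (pvLab k) s.toList hni).symm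
    rw [← hstep, ih _ (fun w hw => hne w (List.mem_cons_of_mem _ hw))]

-- ===== VERDICT (by name: the statement is the Claim_ definition above) =====
theorem humanize_column_tokens_spec : Claim_equal_humanize_column_tokens := by
  unfold Claim_equal_humanize_column_tokens
  intro text _
  unfold Spec_humanize_column_tokens
  by_cases h : text = ""
  · simp [humanize_column_tokens, humanize_column_tokens_alt, h]
  · have hmap : pvTokenLabels.map Prod.fst = pvSortedTokens := by decide
    have hlist :
        (humanize_column_tokens text).toList = (humanize_column_tokens_alt text).toList := by
      rw [humanize_column_tokens, humanize_column_tokens_alt, if_neg h, if_neg h]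
      rw [String.toList_ofList]
      rw [pvFold_toList pvSortedTokens text (by decide)]
      rw [pvChain pvTokenLabels (by decide) text.toList]
      rw [hmap]
    calc humanize_column_tokens text
        = String.ofList (humanize_column_tokens text).toList := String.ofList_toList.symm
      _ = String.ofList (humanize_column_tokens_alt text).toList := by rw [hlist]
      _ = humanize_column_tokens_alt text := String.ofList_toList
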